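-- pv_equiv track=rewrite | github.com/vulnz/dominator | modules/package_files/module.py | _parse_yarn_lock
-- ===== SOURCE A (Python) =====
-- def _parse_yarn_lock(content: str) -> dict:
--     """Parse yarn.lock"""
--     deps = {}
--     current_pkg = None
--     for line in content.split('\n')[:200]:
--         if line and not line.startswith(' ') and not line.startswith('#'):
--             current_pkg = line.split('@')[0].strip('"')
--         elif 'version' in line and current_pkg:
--             version = line.split('"')[1] if '"' in line else line.split()[-1]
--             deps[current_pkg] = version
--     return {'dependencies': deps}
-- ===== SOURCE B (Python) =====
-- def _parse_yarn_lock(content: str) -> dict: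
--     """Parse yarn.lock (two-pass: group stanzas, then extract name/last version per stanza)."""
--     lines = content.split('\n')[:200]
--
--     def is_header(line):
--         return bool(line) and not line.startswith(' ') and not line.startswith('#')
--
--     # pass 1: group each header line with the indented/blank/comment lines following it
--     stanzas = []
--     i = 0
--     while i < len(lines) and not is_header(lines[i]):
--         i += 1  # drop lines before the first header
--     while i < len(lines):
--         j = i + 1
--         while j < len(lines) and not is_header(lines[j]):
--             j += 1
--         stanzas.append((lines[i], lines[i + 1:j]))
--         i = j
--
--     # pass 2: one dict entry per stanza, last 'version' line wins
--     deps = {}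
--     for header, body in stanzas:
--         name = header.split('@')[0].strip('"')
--         if not name:
--             continue
--         version = None
--         for line in body:
--             if 'version' in line:
--                 version = line.split('"')[1] if '"' in line else line.split()[-1]
--         if version is not None:
--             deps[name] = version
--     return {'dependencies': deps}
-- ===== Notes on version B (the rewrite author's own statement) =====
-- stated objective: alternative
-- what changed: Replaces A's single stateful line loop (current_pkg carried across lines) with a two-pass decomposition: first group the first 200 lines into stanzas (header line + following non-header lines), then emit one dict entry per stanza from its last 'version' line.
import Mathlib
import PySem

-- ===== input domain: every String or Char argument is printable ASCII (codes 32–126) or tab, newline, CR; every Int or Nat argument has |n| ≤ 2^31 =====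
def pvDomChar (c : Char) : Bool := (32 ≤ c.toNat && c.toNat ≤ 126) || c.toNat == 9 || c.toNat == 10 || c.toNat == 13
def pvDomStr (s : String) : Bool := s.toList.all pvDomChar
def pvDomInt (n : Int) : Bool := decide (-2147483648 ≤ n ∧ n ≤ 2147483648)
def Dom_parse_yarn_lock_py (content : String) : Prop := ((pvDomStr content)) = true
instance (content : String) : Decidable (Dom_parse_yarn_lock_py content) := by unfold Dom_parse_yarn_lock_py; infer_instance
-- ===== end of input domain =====

-- B re-implements A's single stateful line loop as two passes (group stanzas, then one
-- dict entry per stanza from its last version line); equal return value, no speed claim.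

-- ===== PORT A =====
-- shared line-level helpers: both Python versions contain these exact expressions
-- Python: line and not line.startswith(' ') and not line.startswith('#')
def pvIsHeader (line : String) : Bool :=
  (line != "") && !(PySem.Str.startswith line " ") && !(PySem.Str.startswith line "#")

-- s.split(sep) for a literal (nonempty) sep: PySem.Str.split? is none only for sep = ""
def pvSplit (s sep : String) : List String := (PySem.Str.split? s sep).getD []

-- Python: line.split('@')[0].strip('"')  ([0] always exists)
def pvName (line : String) : String :=
  PySem.Str.stripChars ((pvSplit line "@").headD "") "\""

-- Python: line.split('"')[1] if '"' in line else line.split()[-1]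
-- ([1] exists since '"' occurs; [-1] exists since the line contains 'version', so split() ≠ [])
def pvVersion (line : String) : String :=
  if PySem.Str.isIn "\"" line then (PySem.List.pyGet? (pvSplit line "\"") 1).getD ""
  else (PySem.List.pyGet? (PySem.Str.split₀ line) (-1)).getD ""

def pvIsVer (line : String) : Bool := PySem.Str.isIn "version" line

-- truthiness of current_pkg (None or "" are falsy)
def pvTruthy : Option String → Bool
  | none => false
  | some s => s != ""

-- A's loop: state = (deps, current_pkg)
def pvALoop : List String → PySem.Dict String String → Option String → PySem.Dict String String
  | [], deps, _ => deps
  | line :: rest, deps, cur =>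
    if pvIsHeader line then
      pvALoop rest deps (some (pvName line))
    else if pvIsVer line && pvTruthy cur then
      pvALoop rest (deps.insert (cur.getD "") (pvVersion line)) cur
    else
      pvALoop rest deps cur

def parse_yarn_lock_py (content : String) : List (String × List (String × String)) :=
  let lines := PySem.List.slice (pvSplit content "\n") none (some 200)
  [("dependencies", (pvALoop lines PySem.Dict.empty none).items)]

-- ===== PORT B =====
-- pass 1: group each header line with the non-header lines that follow it
def pvStanzas : List String → List (String × List String)
  | [] => []
  | h :: rest =>
    (h, rest.takeWhile (fun l => !pvIsHeader l)) ::
      pvStanzas (rest.dropWhile (fun l => !pvIsHeader l))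
termination_by ls => ls.length
decreasing_by
  simp only [List.length_cons]
  exact Nat.lt_succ_of_le (List.length_dropWhile_le _ _)

-- inner loop of pass 2: last 'version' line of a stanza body
def pvLastVersion (body : List String) : Option String :=
  body.foldl (fun acc l => if pvIsVer l then some (pvVersion l) else acc) none

-- loop body of pass 2 (one dict entry per stanza)
def pvStanzaStep (deps : PySem.Dict String String) (hb : String × List String) :
    PySem.Dict String String :=
  let name := pvName hb.1
  if name == "" then deps
  else
    match pvLastVersion hb.2 with
    | none => deps
    | some v => deps.insert name v

def pvBDeps (sts : List (String × List String)) : PySem.Dict String String :=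
  sts.foldl pvStanzaStep PySem.Dict.empty

def parse_yarn_lock_py_alt (content : String) : List (String × List (String × String)) :=
  let lines := PySem.List.slice (pvSplit content "\n") none (some 200)
  [("dependencies",
    (pvBDeps (pvStanzas (lines.dropWhile (fun l => !pvIsHeader l)))).items)]

-- ===== PRECONDITION & SPEC =====
def Spec_parse_yarn_lock_py (content : String) (out : List (String × List (String × String))) : Prop := out = parse_yarn_lock_py_alt content
instance (content : String) (out : List (String × List (String × String))) : Decidable (Spec_parse_yarn_lock_py content out) := by unfold Spec_parse_yarn_lock_py; infer_instance

-- ===== CLAIM (what is proved, stated in full; the proofs are below) =====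
def Claim_equal_parse_yarn_lock_py : Prop := ∀ (content : String), Dom_parse_yarn_lock_py content → Spec_parse_yarn_lock_py content (parse_yarn_lock_py content)

-- ===== LEMMAS AND PROOFS =====

-- effect of A's loop on a run of non-header lines, given the current package
def pvPre (deps : PySem.Dict String String) (cur : Option String) (pre : List String) :
    PySem.Dict String String :=
  match cur with
  | none => deps
  | some p =>
    if p == "" then deps
    else
      match pvLastVersion pre with
      | none => deps
      | some v => deps.insert p v

lemma pvPre_nil (deps : PySem.Dict String String) (cur : Option String) :
    pvPre deps cur [] = deps := by
  cases cur with
  | none => rfl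
  | some p => by_cases hp : p == "" <;> simp [pvPre, hp, pvLastVersion]

-- pvPre and pvStanzaStep coincide on a header's stanza
lemma pvStanzaStep_eq_pvPre (deps : PySem.Dict String String) (h : String) (body : List String) :
    pvStanzaStep deps (h, body) = pvPre deps (some (pvName h)) body := rfl

-- folding the option accumulator: any start acc is overridden by the last hit
lemma pvLastVersion_acc : ∀ (body : List String) (acc : Option String),
    body.foldl (fun a l => if pvIsVer l then some (pvVersion l) else a) acc
      = (pvLastVersion body).or acc := by
  intro body
  induction body with
  | nil => intro acc; simp [pvLastVersion]
  | cons l b ih =>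
    intro acc
    by_cases hv : pvIsVer l
    · have h1 : pvLastVersion (l :: b) = (pvLastVersion b).or (some (pvVersion l)) := by
        simp only [pvLastVersion, List.foldl_cons, hv, if_true]
        exact ih (some (pvVersion l))
      simp only [List.foldl_cons, hv, if_true, h1, ih (some (pvVersion l))]
      cases pvLastVersion b <;> simp
    · have hv' : pvIsVer l = false := by simpa using hv
      have h1 : pvLastVersion (l :: b) = pvLastVersion b := by
        simp [pvLastVersion, hv']
      simp [List.foldl_cons, hv', h1, ih acc]

-- A's loop across a headerless run equals pvPre, then continues
lemma pvALoop_nonheader : ∀ (pre rest : List String) (deps : PySem.Dict String String)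
    (cur : Option String), (∀ l ∈ pre, pvIsHeader l = false) →
    pvALoop (pre ++ rest) deps cur = pvALoop rest (pvPre deps cur pre) cur := by
  intro pre
  induction pre with
  | nil => intro rest deps cur _; rw [List.nil_append, pvPre_nil]
  | cons l pre ih =>
    intro rest deps cur hpre
    have hl : pvIsHeader l = false := hpre l (List.mem_cons_self ..)
    have hpre' : ∀ x ∈ pre, pvIsHeader x = false := fun x hx => hpre x (List.mem_cons_of_mem _ hx)
    cases cur with
    | none =>
      simp only [List.cons_append, pvALoop, hl, Bool.false_eq_true, if_false, pvTruthy,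
        Bool.and_false]
      rw [ih rest deps none hpre']
      rfl
    | some p =>
      by_cases hp : p == ""
      · have hpt : pvTruthy (some p) = false := by simp [pvTruthy]; simpa using hp
        simp only [List.cons_append, pvALoop, hl, Bool.false_eq_true, if_false, hpt,
          Bool.and_false]
        rw [ih rest deps (some p) hpre']
        simp [pvPre, hp]
      · have hp' : (p != "") = true := by simpa using hp
        have hpt : pvTruthy (some p) = true := by simp [pvTruthy, hp']
        by_cases hv : pvIsVer l
        · simp only [List.cons_append, pvALoop, hl, Bool.false_eq_true, if_false, hv, hpt,
            Bool.and_self, if_true, Option.getD_some]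
          rw [ih rest _ (some p) hpre']
          have h1 : pvLastVersion (l :: pre) = (pvLastVersion pre).or (some (pvVersion l)) := by
            simp only [pvLastVersion, List.foldl_cons, hv, if_true]
            exact pvLastVersion_acc pre (some (pvVersion l))
          simp only [pvPre, hp, Bool.false_eq_true, if_false, h1]
          cases pvLastVersion pre <;> simp [PySem.Dict.insert_insert_self]
        · have hv' : pvIsVer l = false := by simpa using hv
          simp only [List.cons_append, pvALoop, hl, Bool.false_eq_true, if_false, hv',
            Bool.false_and, if_false]
          rw [ih rest deps (some p) hpre']
          have h1 : pvLastVersion (l :: pre) = pvLastVersion pre := by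
            simp [pvLastVersion, hv']
          simp [pvPre, h1]

-- main invariant: A's loop = B's stanza fold
lemma pvMain : ∀ (n : ℕ) (lines : List String), lines.length ≤ n →
    ∀ (deps : PySem.Dict String String) (cur : Option String),
    pvALoop lines deps cur
      = (pvStanzas (lines.dropWhile (fun l => !pvIsHeader l))).foldl pvStanzaStep
          (pvPre deps cur (lines.takeWhile (fun l => !pvIsHeader l))) := by
  intro n
  induction n with
  | zero =>
    intro lines hlen deps cur
    have hnil : lines = [] := List.eq_nil_of_length_eq_zero (Nat.le_zero.mp hlen)
    subst hnil
    simp [pvALoop, pvStanzas, pvPre_nil]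
  | succ n ih =>
    intro lines hlen deps cur
    have hsplit := List.takeWhile_append_dropWhile (p := fun l => !pvIsHeader l) (l := lines)
    have hpre : ∀ l ∈ lines.takeWhile (fun l => !pvIsHeader l), pvIsHeader l = false := by
      intro l hl
      simpa using List.mem_takeWhile_imp hl
    conv_lhs => rw [← hsplit]
    rw [pvALoop_nonheader _ _ _ _ hpre]
    cases hrest : lines.dropWhile (fun l => !pvIsHeader l) with
    | nil => simp [pvStanzas, pvALoop]
    | cons h tail =>
      have hne : lines.dropWhile (fun l => !pvIsHeader l) ≠ [] := by simp [hrest]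
      have hh' := List.head_dropWhile_not (fun l => !pvIsHeader l) hne
      simp only [hrest, List.head_cons] at hh'
      have hh : pvIsHeader h = true := by simpa using hh'
      have htail_len : tail.length ≤ n := by
        have h1 : (lines.dropWhile (fun l => !pvIsHeader l)).length ≤ lines.length :=
          List.length_dropWhile_le _ _
        rw [hrest] at h1
        simp only [List.length_cons] at h1
        omega
      simp only [pvALoop, hh, if_true]
      rw [ih tail htail_len _ (some (pvName h))]
      rw [pvStanzas]
      simp only [List.foldl_cons, pvStanzaStep_eq_pvPre]

-- ===== VERDICT (by name: the statement is the Claim_ definition above) =====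
theorem parse_yarn_lock_py_spec : Claim_equal_parse_yarn_lock_py := by
  intro content _
  simp only [Spec_parse_yarn_lock_py, parse_yarn_lock_py, parse_yarn_lock_py_alt]
  rw [pvMain (PySem.List.slice (pvSplit content "\n") none (some 200)).length
    (PySem.List.slice (pvSplit content "\n") none (some 200)) le_rfl PySem.Dict.empty none]
  rfl
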